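-- pv_equiv track=rewrite | github.com/Jose25UPT/webguard | vigilant-webguard/backend/app/services/real_security_apis.py | _detect_cdn
-- ===== SOURCE A (Python) =====
-- from typing import Dict, List, Optional
--
-- def _detect_cdn(headers: Dict) -> str:
--     """Detectar CDN"""
--     cdn_headers = {
--         'CloudFlare': ['cf-ray', 'cloudflare'],
--         'AWS CloudFront': ['cloudfront'],
--         'Fastly': ['fastly'],
--         'KeyCDN': ['keycdn'],
--         'MaxCDN': ['maxcdn']
--     }
--
--     for cdn, patterns in cdn_headers.items():
--         for header_name, header_value in headers.items():
--             if any(pattern in header_name.lower() or pattern in str(header_value).lower() for pattern in patterns):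
--                 return cdn
--
--     return 'Unknown'
-- ===== SOURCE B (Python) =====
-- def _detect_cdn(headers):
--     """Detectar CDN"""
--     # Flat priority list: first (pattern, cdn) whose pattern occurs wins.
--     pattern_cdn = [
--         ('cf-ray', 'CloudFlare'),
--         ('cloudflare', 'CloudFlare'),
--         ('cloudfront', 'AWS CloudFront'),
--         ('fastly', 'Fastly'),
--         ('keycdn', 'KeyCDN'),
--         ('maxcdn', 'MaxCDN'),
--     ]
--     # One lowercased haystack of all header names/values, '\n'-separated
--     # ('\n' occurs in no pattern, so no pattern can span two fields).
--     blob = '\n'.join(x for name, value in headers.items()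
--                      for x in (name.lower(), str(value).lower()))
--     return next((cdn for pat, cdn in pattern_cdn if pat in blob), 'Unknown')
-- ===== Notes on version B (the rewrite author's own statement) =====
-- stated objective: simpler
-- what changed: B flattens the per-CDN pattern dict into one priority-ordered (pattern, cdn) list and builds a single lowercased '\n'-joined haystack of all headers once, replacing A's nested per-CDN rescan (with repeated lowercasing) of every header by one linear search for the first matching pattern.
import Mathlib
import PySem

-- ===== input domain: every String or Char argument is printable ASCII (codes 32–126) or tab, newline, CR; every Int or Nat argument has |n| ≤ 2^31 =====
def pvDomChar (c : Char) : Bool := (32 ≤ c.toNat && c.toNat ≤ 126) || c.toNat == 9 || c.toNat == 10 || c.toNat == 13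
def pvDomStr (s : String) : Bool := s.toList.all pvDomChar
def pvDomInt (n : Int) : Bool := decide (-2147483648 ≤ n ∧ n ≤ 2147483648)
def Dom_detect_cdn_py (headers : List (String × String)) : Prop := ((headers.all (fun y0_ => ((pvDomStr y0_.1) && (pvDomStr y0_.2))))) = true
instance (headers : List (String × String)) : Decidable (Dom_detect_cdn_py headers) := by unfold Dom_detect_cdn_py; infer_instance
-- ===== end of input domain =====

-- B flattens A's per-CDN pattern dict into one priority-ordered (pattern, cdn) list
-- and scans one lowercased '\n'-joined haystack built once, instead of A's nested
-- per-CDN rescan of every header (simpler decomposition).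

-- ===== PORT A =====
-- the literal cdn_headers dict of A, in insertion order
def pvTableA : List (String × List String) :=
  [("CloudFlare", ["cf-ray", "cloudflare"]),
   ("AWS CloudFront", ["cloudfront"]),
   ("Fastly", ["fastly"]),
   ("KeyCDN", ["keycdn"]),
   ("MaxCDN", ["maxcdn"])]

-- any(pattern in header_name.lower() or pattern in str(header_value).lower() for pattern in patterns)
def pvAnyMatchA (patterns : List String) (name value : String) : Bool :=
  patterns.any (fun p =>
    PySem.Str.isIn p (PySem.Str.lower name) || PySem.Str.isIn p (PySem.Str.lower value))

-- outer loop over cdn_headers.items(); the inner 'for … return cdn' is List.any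
def pvLoopA (headers : List (String × String)) : List (String × List String) → String
  | [] => "Unknown"
  | (cdn, patterns) :: rest =>
      if headers.any (fun hv => pvAnyMatchA patterns hv.1 hv.2) then cdn
      else pvLoopA headers rest

def detect_cdn_py (headers : List (String × String)) : String :=
  pvLoopA headers pvTableA

-- ===== PORT B =====
-- the flat priority list pattern_cdn of Source B
def pvPatternCdn : List (String × String) :=
  [("cf-ray", "CloudFlare"),
   ("cloudflare", "CloudFlare"),
   ("cloudfront", "AWS CloudFront"),
   ("fastly", "Fastly"),
   ("keycdn", "KeyCDN"),
   ("maxcdn", "MaxCDN")]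

-- blob = '\n'.join(x for name, value in headers.items() for x in (name.lower(), str(value).lower()))
def pvBlob (headers : List (String × String)) : String :=
  PySem.Str.join "\n"
    (headers.flatMap (fun nv => [PySem.Str.lower nv.1, PySem.Str.lower nv.2]))

-- next((cdn for pat, cdn in pattern_cdn if pat in blob), 'Unknown')
def detect_cdn_py_alt (headers : List (String × String)) : String :=
  match pvPatternCdn.find? (fun pc => PySem.Str.isIn pc.1 (pvBlob headers)) with
  | some pc => pc.2
  | none => "Unknown"

-- ===== PRECONDITION & SPEC =====
def Spec_detect_cdn_py (headers : List (String × String)) (out : String) : Prop := out = detect_cdn_py_alt headers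
instance (headers : List (String × String)) (out : String) : Decidable (Spec_detect_cdn_py headers out) := by unfold Spec_detect_cdn_py; infer_instance

-- ===== CLAIM (what is proved, stated in full; the proofs are below) =====
def Claim_equal_detect_cdn_py : Prop := ∀ (headers : List (String × String)), Dom_detect_cdn_py headers → Spec_detect_cdn_py headers (detect_cdn_py headers)

-- ===== LEMMAS AND PROOFS =====

-- a '\n'-free pattern is a prefix of a ++ '\n' :: b iff it is a prefix of a
theorem pvPrefixSep {p : List Char} (hp : '\n' ∉ p) :
    ∀ (a b : List Char), (p <+: a ++ '\n' :: b ↔ p <+: a) := by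
  induction p with
  | nil => intro a b; simp
  | cons c p' ih =>
      intro a b
      cases a with
      | nil =>
          simp only [List.nil_append, List.cons_prefix_cons, List.prefix_nil]
          constructor
          · rintro ⟨rfl, -⟩; exact absurd (by simp) hp
          · intro h; simp at h
      | cons d a' =>
          simp only [List.cons_append, List.cons_prefix_cons]
          have := ih (fun h => hp (List.mem_cons_of_mem _ h)) a' b
          tauto

-- a '\n'-free pattern occurs in a ++ '\n' :: b iff it occurs in a or in b
theorem pvInfixSep {p : List Char} (hp : '\n' ∉ p) :
    ∀ (a b : List Char), (p <:+: a ++ '\n' :: b ↔ p <:+: a ∨ p <:+: b) := by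
  intro a b
  induction a with
  | nil =>
      simp only [List.nil_append, List.infix_cons_iff, List.infix_nil]
      constructor
      · rintro (h | h)
        · rcases List.eq_nil_of_prefix_nil ((pvPrefixSep hp [] b).mp h) with rfl
          exact Or.inl rfl
        · exact Or.inr h
      · rintro (rfl | h)
        · exact Or.inr List.nil_infix
        · exact Or.inr h
  | cons x a' ih =>
      simp only [List.cons_append, List.infix_cons_iff]
      rw [show x :: (a' ++ '\n' :: b) = (x :: a') ++ '\n' :: b from rfl,
          pvPrefixSep hp (x :: a') b, ih]
      tauto

-- a nonempty '\n'-free pattern occurs in join ['\n'] fields iff in some field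
theorem pvIsInJoin {p : List Char} (hp : '\n' ∉ p) (hne : p ≠ []) :
    ∀ fields : List (List Char),
      PySem.Chars.isIn p (PySem.Chars.join ['\n'] fields) =
        fields.any (fun f => PySem.Chars.isIn p f) := by
  intro fields
  induction fields with
  | nil =>
      rw [PySem.Chars.join_nil]
      simp only [List.any_nil]
      rw [PySem.Chars.isIn_eq_false_iff, List.infix_nil]
      exact hne
  | cons f rest ih =>
      cases rest with
      | nil =>
          rw [PySem.Chars.join_singleton]
          simp
      | cons g r =>
          rw [PySem.Chars.join_cons_cons, List.append_assoc, List.singleton_append]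
          rw [List.any_cons, ← ih, Bool.eq_iff_iff]
          simp only [Bool.or_eq_true, PySem.Chars.isIn_iff_infix]
          exact pvInfixSep hp f _

-- B's blob test of one pattern equals A's per-header scan with that pattern
theorem pvBlobOne (p : String) (h1 : p.toList ≠ []) (h2 : '\n' ∉ p.toList)
    (headers : List (String × String)) :
    PySem.Str.isIn p (pvBlob headers) =
      headers.any (fun hv =>
        PySem.Str.isIn p (PySem.Str.lower hv.1) || PySem.Str.isIn p (PySem.Str.lower hv.2)) := by
  unfold pvBlob
  rw [show PySem.Str.isIn p (PySem.Str.join "\n" (headers.flatMap fun nv => [PySem.Str.lower nv.1, PySem.Str.lower nv.2]))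
        = PySem.Chars.isIn p.toList (PySem.Str.join "\n" (headers.flatMap fun nv => [PySem.Str.lower nv.1, PySem.Str.lower nv.2])).toList
      from PySem.Str.isIn_eq _ _]
  rw [PySem.Str.toList_join, show ("\n" : String).toList = ['\n'] from rfl,
      pvIsInJoin h2 h1]
  rw [List.any_map, List.any_flatMap]
  simp [Function.comp, PySem.Str.isIn_eq]

-- B's per-CDN group of patterns matches the blob iff A's per-CDN scan of headers fires
theorem pvCondEq (patterns : List String)
    (hp : ∀ p ∈ patterns, p.toList ≠ [] ∧ '\n' ∉ p.toList)
    (headers : List (String × String)) :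
    (patterns.any (fun p => PySem.Str.isIn p (pvBlob headers))) =
      headers.any (fun hv => pvAnyMatchA patterns hv.1 hv.2) := by
  unfold pvAnyMatchA
  rw [Bool.eq_iff_iff]
  simp only [List.any_eq_true]
  constructor
  · rintro ⟨p, hpm, hin⟩
    rw [pvBlobOne p (hp p hpm).1 (hp p hpm).2 headers] at hin
    simp only [List.any_eq_true] at hin
    obtain ⟨hv, hhm, hin2⟩ := hin
    exact ⟨hv, hhm, p, hpm, hin2⟩
  · rintro ⟨hv, hhm, p, hpm, hin⟩
    refine ⟨p, hpm, ?_⟩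
    rw [pvBlobOne p (hp p hpm).1 (hp p hpm).2 headers]
    simp only [List.any_eq_true]
    exact ⟨hv, hhm, hin⟩

-- flatten A's table to B's flat (pattern, cdn) priority list
def pvFlat (table : List (String × List String)) : List (String × String) :=
  table.flatMap (fun e => e.2.map (fun p => (p, e.1)))

-- first match in the flat list = A's nested loop result
theorem pvFindFlat (headers : List (String × String)) :
    ∀ table : List (String × List String),
      (∀ e ∈ table, ∀ p ∈ e.2, p.toList ≠ [] ∧ '\n' ∉ p.toList) →
      (match (pvFlat table).find? (fun pc => PySem.Str.isIn pc.1 (pvBlob headers)) with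
       | some pc => pc.2
       | none => "Unknown") = pvLoopA headers table := by
  intro table
  induction table with
  | nil => intro _; rfl
  | cons e rest ih =>
      intro h
      obtain ⟨cdn, patterns⟩ := e
      have hgrp := pvCondEq patterns (h _ List.mem_cons_self) headers
      simp only [pvFlat, List.flatMap_cons, List.find?_append, List.find?_map,
        Function.comp_def, pvLoopA]
      rcases hfp : patterns.find? (fun p => PySem.Str.isIn p (pvBlob headers)) with _ | p
      · have hnone : (patterns.any fun p => PySem.Str.isIn p (pvBlob headers)) = false := by
          rw [List.any_eq_false]
          intro p hpm
          simpa using List.find?_eq_none.mp hfp p hpm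
        rw [hnone] at hgrp
        rw [← hgrp]
        simp only [Option.map_none, Option.none_or, Bool.false_eq_true, if_false]
        exact ih (fun e he => h e (List.mem_cons_of_mem _ he))
      · have hsome : (patterns.any fun p => PySem.Str.isIn p (pvBlob headers)) = true := by
          rw [List.any_eq_true]
          exact ⟨p, List.mem_of_find?_eq_some hfp, by simpa using List.find?_some hfp⟩
        rw [hsome] at hgrp
        rw [← hgrp]
        simp

-- ===== VERDICT (by name: the statement is the Claim_ definition above) =====
theorem detect_cdn_py_spec : Claim_equal_detect_cdn_py := by
  intro headers _
  unfold Spec_detect_cdn_py detect_cdn_py detect_cdn_py_alt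
  rw [show pvPatternCdn = pvFlat pvTableA from rfl]
  exact (pvFindFlat headers pvTableA (by decide)).symm
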